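-- pv_equiv track=rewrite | github.com/DPNT-Sourcecode/CHK-berp01 | lib/solutions/CHK/checkout_solution.py | buy_x_get_x_free
-- ===== SOURCE A (Python) =====
-- def get_sku_lookup():  # normally would have to query a database or something, will cheat and return a dict
--     ''' get a dict of all the {skus:prices}'''
--     sku_lookup = {
--         'A': 50,
--         'B': 30,
--         'C': 20,
--         'D': 15,
--         'E': 40,
--         'F': 10,
--         'G': 20,
--         'H': 10,
--         'I': 35,
--         'J': 60,
--         'K': 70,
--         'L': 90,
--         'M': 15,
--         'N': 40,
--         'O': 10,
--         'P': 50,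
--         'Q': 30,
--         'R': 50,
--         'S': 20,
--         'T': 20,
--         'U': 40,
--         'V': 50,
--         'W': 20,
--         'X': 17,
--         'Y': 20,
--         'Z': 21}
--     return sku_lookup
--
-- def buy_x_get_x_free(basket):
--     ''' take care of by X of item Y get Z of W free
--                     input arguement basket: dict of item:count
--                     return modified dict, current basket total
--     '''
--     total = 0
--     # for every '2' 'E' get 1 'B'
--     special_offers = {
--         'E': [2, ['B', 1]],
--         'F': [2, ['F', 1]],
--         'N': [3, ['M', 1]],
--         'R': [3, ['Q', 1]],
--         'U': [3, ['U', 1]]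
--     }
--
--     for key in special_offers.keys():
--         if key in basket:
--             # we have a special offer item to process
--             required_for_offer_count = special_offers[key][0]
--             # basket_count = basket[key]
--             while required_for_offer_count <= basket[key]:
--                 # number_of_offers = int(basket_count/ required_for_offer_count)
--                 # add the value of the purchases special offer items
--                 total = total + (get_sku_lookup()
--                                  [key] * (required_for_offer_count))
--
--                 free_item_key = special_offers[key][1][0]
--                 free_item_count = special_offers[key][1][1]
--
--                 # decrement basket based on offer
--                 basket[key] = basket[key] - required_for_offer_count
--
--                 # take free_item_count free_item_keys from basket.
--                 if free_item_key in basket: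
--                     basket[free_item_key] = max(
--                         0, (basket[free_item_key]-free_item_count))
--
--     return basket, total
-- ===== SOURCE B (Python) =====
-- def buy_x_get_x_free(basket):
--     ''' same contract as A: mutate basket per the buy-X-get-Y-free offers and
--     return (basket, offer total); each offer is settled with one closed-form
--     division instead of A's iterative per-round subtraction loop. '''
--     total = 0
--     prices = {'E': 40, 'F': 10, 'N': 40, 'R': 50, 'U': 40}
--     offers = [('E', 2, 'B', 1), ('F', 2, 'F', 1), ('N', 3, 'M', 1), ('R', 3, 'Q', 1), ('U', 3, 'U', 1)]
--     for key, req, fkey, fcnt in offers: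
--         if key not in basket:
--             continue
--         n = basket[key]
--         if n < req:
--             continue
--         if fkey == key:
--             # each round of the offer consumes req paid + fcnt free of the same item
--             r = req + fcnt
--             k = (n + fcnt) // r
--             basket[key] = max(0, n - k * r)
--         else:
--             k = n // req
--             basket[key] = n - k * req
--             if fkey in basket:
--                 basket[fkey] = max(0, basket[fkey] - fcnt * k)
--         total += prices[key] * req * k
--     return basket, total
-- ===== Notes on version B (the rewrite author's own statement) =====
-- stated objective: alternative
-- what changed: Each offer is settled with one closed-form division (k = count // required, resp. (count+free)//(required+free) for self-referencing offers) instead of A's while-loop that subtracts required and decrements the free item once per offer round.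
import Mathlib
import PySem

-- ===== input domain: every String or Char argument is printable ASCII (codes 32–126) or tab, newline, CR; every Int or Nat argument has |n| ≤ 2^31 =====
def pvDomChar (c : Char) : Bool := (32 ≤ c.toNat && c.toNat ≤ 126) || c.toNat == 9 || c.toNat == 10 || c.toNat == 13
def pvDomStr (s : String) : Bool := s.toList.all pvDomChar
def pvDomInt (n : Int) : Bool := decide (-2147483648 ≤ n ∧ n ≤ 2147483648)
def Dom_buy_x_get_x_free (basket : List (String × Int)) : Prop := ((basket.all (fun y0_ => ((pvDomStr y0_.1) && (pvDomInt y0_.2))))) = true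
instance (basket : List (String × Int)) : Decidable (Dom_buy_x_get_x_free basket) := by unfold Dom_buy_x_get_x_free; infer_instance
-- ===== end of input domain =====

-- B settles each offer with one closed-form division instead of A's per-round while-loop
-- (subtract `required`, decrement the free item, repeat); A mutates its basket dict in place
-- and B performs the same net mutation, so the returned (basket, total) pair is equal.


-- ===== PORT A =====
-- get_sku_lookup()
def pvSkuLookup : PySem.Dict String Int := PySem.Dict.ofList
  [("A",50),("B",30),("C",20),("D",15),("E",40),("F",10),("G",20),("H",10),("I",35),
   ("J",60),("K",70),("L",90),("M",15),("N",40),("O",10),("P",50),("Q",30),("R",50),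
   ("S",20),("T",20),("U",40),("V",50),("W",20),("X",17),("Y",20),("Z",21)]

-- special_offers, as (key, required_for_offer_count, free_item_key, free_item_count) in dict order
def pvSpecialOffersA : List (String × Int × String × Int) :=
  [("E",2,"B",1),("F",2,"F",1),("N",3,"M",1),("R",3,"Q",1),("U",3,"U",1)]

-- the 'while required_for_offer_count <= basket[key]' loop of A, verbatim per iteration.
-- '1 ≤ req ∧ 0 ≤ fcnt' is a pure totality guard (always true: the offers have req ∈ {2,3}, fcnt = 1).
def pvLoopA (key : String) (req : Int) (fkey : String) (fcnt : Int)
    (d : PySem.Dict String Int) (total : Int) : PySem.Dict String Int × Int :=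
  if _h : 1 ≤ req ∧ 0 ≤ fcnt ∧ req ≤ d.getD key 0 then
    pvLoopA key req fkey fcnt
      (let d1 := d.insert key (d.getD key 0 - req)
       if d1.contains fkey then d1.insert fkey (max 0 (d1.getD fkey 0 - fcnt)) else d1)
      (total + pvSkuLookup.getD key 0 * req)
  else (d, total)
termination_by (d.getD key 0).toNat
decreasing_by
  obtain ⟨h1, h2, h3⟩ := _h
  by_cases hfk : fkey = key
  · subst hfk
    simp [PySem.Dict.contains_insert_self, PySem.Dict.insert_insert_self,
          PySem.Dict.getD_insert_self]
    omega
  · split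
    · rw [PySem.Dict.getD_insert_of_ne _ _ _ (fun hh => hfk hh.symm), PySem.Dict.getD_insert_self]
      omega
    · rw [PySem.Dict.getD_insert_self]
      omega

def pvStepA (st : PySem.Dict String Int × Int) (off : String × Int × String × Int) :
    PySem.Dict String Int × Int :=
  if st.1.contains off.1 then pvLoopA off.1 off.2.1 off.2.2.1 off.2.2.2 st.1 st.2 else st

def buy_x_get_x_free (basket : List (String × Int)) : (List (String × Int)) × Int :=
  let res := pvSpecialOffersA.foldl pvStepA (PySem.Dict.mk basket, 0)
  (res.1.items, res.2)

-- ===== PORT B =====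
def pvPricesB : PySem.Dict String Int := PySem.Dict.ofList
  [("E",40),("F",10),("N",40),("R",50),("U",40)]

def pvOffersB : List (String × Int × String × Int) :=
  [("E",2,"B",1),("F",2,"F",1),("N",3,"M",1),("R",3,"Q",1),("U",3,"U",1)]

def pvStepB (st : PySem.Dict String Int × Int) (off : String × Int × String × Int) :
    PySem.Dict String Int × Int :=
  match st.1.get? off.1 with
  | none => st
  | some n =>
    if n < off.2.1 then st
    else if off.2.2.1 == off.1 then
      -- self-referencing offer: each round consumes req paid + fcnt free of the same item
      let r := off.2.1 + off.2.2.2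
      let k := PySem.Int.floordiv (n + off.2.2.2) r
      (st.1.insert off.1 (max 0 (n - k * r)), st.2 + pvPricesB.getD off.1 0 * off.2.1 * k)
    else
      let k := PySem.Int.floordiv n off.2.1
      let d1 := st.1.insert off.1 (n - k * off.2.1)
      let d2 := if d1.contains off.2.2.1
                then d1.insert off.2.2.1 (max 0 (d1.getD off.2.2.1 0 - off.2.2.2 * k))
                else d1
      (d2, st.2 + pvPricesB.getD off.1 0 * off.2.1 * k)

def buy_x_get_x_free_alt (basket : List (String × Int)) : (List (String × Int)) × Int :=
  let res := pvOffersB.foldl pvStepB (PySem.Dict.mk basket, 0)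
  (res.1.items, res.2)

-- ===== PRECONDITION & SPEC =====
def Spec_buy_x_get_x_free (basket : List (String × Int)) (out : (List (String × Int)) × Int) : Prop := out = buy_x_get_x_free_alt basket
instance (basket : List (String × Int)) (out : (List (String × Int)) × Int) : Decidable (Spec_buy_x_get_x_free basket out) := by unfold Spec_buy_x_get_x_free; infer_instance

-- ===== CLAIM (what is proved, stated in full; the proofs are below) =====
def Claim_equal_buy_x_get_x_free : Prop := ∀ (basket : List (String × Int)), Dom_buy_x_get_x_free basket → Spec_buy_x_get_x_free basket (buy_x_get_x_free basket)

-- ===== LEMMAS AND PROOFS =====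

-- two in-place overwrites at distinct, already-present keys commute
lemma pv_insert_comm (d : PySem.Dict String Int) (k k' : String) (v w : Int)
    (hk : d.contains k = true) (hk' : d.contains k' = true) (hne : k ≠ k') :
    (d.insert k v).insert k' w = (d.insert k' w).insert k v := by
  apply PySem.Dict.ext
  rw [PySem.Dict.items_insert_of_contains _ w
        (by rw [PySem.Dict.contains_insert]; simp [hk']),
      PySem.Dict.items_insert_of_contains _ v hk,
      PySem.Dict.items_insert_of_contains _ v
        (by rw [PySem.Dict.contains_insert]; simp [hk]),
      PySem.Dict.items_insert_of_contains _ w hk']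
  simp only [List.map_map]
  refine List.map_congr_left (fun p _ => ?_)
  by_cases h1 : p.1 = k <;> by_cases h2 : p.1 = k' <;>
    simp [Function.comp, h1, h2, hne, Ne.symm hne]

-- closed form of A's while-loop when the free item is a DIFFERENT sku than the offer key
lemma pvLoopA_nonself (key fkey : String) (req fcnt : Int)
    (hne : fkey ≠ key) (hreq : 1 ≤ req) (hf : 0 ≤ fcnt) :
    ∀ (N : Nat) (d : PySem.Dict String Int) (total : Int),
      (d.getD key 0).toNat ≤ N →
      d.contains key = true →
      req ≤ d.getD key 0 →
      pvLoopA key req fkey fcnt d total =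
        ((if d.contains fkey
          then (d.insert key (d.getD key 0 - PySem.Int.floordiv (d.getD key 0) req * req)).insert
                 fkey (max 0 (d.getD fkey 0 - fcnt * PySem.Int.floordiv (d.getD key 0) req))
          else d.insert key (d.getD key 0 - PySem.Int.floordiv (d.getD key 0) req * req)),
         total + pvSkuLookup.getD key 0 * req * PySem.Int.floordiv (d.getD key 0) req) := by
  have hkf : key ≠ fkey := fun hh => hne hh.symm
  intro N
  induction N with
  | zero =>
    intro d total hN hc hv
    exact absurd hN (by omega)
  | succ N ih =>
    intro d total hN hc hv
    have hpos : (0:Int) < req := by omega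
    rw [pvLoopA, dif_pos ⟨hreq, hf, hv⟩]
    have hbq : (fkey == key) = false := by simp [hne]
    simp only [PySem.Dict.contains_insert, PySem.Dict.getD_insert_of_ne _ _ _ hne, hbq,
      Bool.false_or]
    set v := d.getD key 0 with hv0
    set c := d.getD fkey 0 with hc0
    set k := PySem.Int.floordiv v req with hk
    have hbr : k * req ≤ v ∧ v < (k + 1) * req :=
      (PySem.Int.floordiv_eq_iff_of_pos hpos).mp hk.symm
    have hk1 : 1 ≤ k := by nlinarith [hbr.1, hbr.2]
    by_cases hcf : d.contains fkey
    · rw [if_pos hcf, if_pos hcf]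
      by_cases h2 : req ≤ v - req
      · -- the loop runs again on ((d.insert key (v-req)).insert fkey (max 0 (c - fcnt)))
        have hck : ((d.insert key (v - req)).insert fkey (max 0 (c - fcnt))).contains key = true := by
          rw [PySem.Dict.contains_insert]
          simp [PySem.Dict.contains_insert_self]
        have hgk : ((d.insert key (v - req)).insert fkey (max 0 (c - fcnt))).getD key 0 = v - req := by
          rw [PySem.Dict.getD_insert_of_ne _ _ _ hkf, PySem.Dict.getD_insert_self]
        rw [ih ((d.insert key (v - req)).insert fkey (max 0 (c - fcnt))) _
              (by rw [hgk]; omega) hck (by rw [hgk]; omega)]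
        have hk2 : PySem.Int.floordiv (v - req) req = k - 1 := by
          rw [PySem.Int.floordiv_eq_iff_of_pos hpos]
          constructor <;> nlinarith [hbr.1, hbr.2]
        have hcf2 : ((d.insert key (v - req)).insert fkey (max 0 (c - fcnt))).contains fkey = true :=
          PySem.Dict.contains_insert_self _ _ _
        have hgf2 : ((d.insert key (v - req)).insert fkey (max 0 (c - fcnt))).getD fkey 0 =
            max 0 (c - fcnt) := PySem.Dict.getD_insert_self _ _ _ _
        rw [hgk, hcf2, if_pos rfl, hgf2, hk2]
        -- collapse the two rounds of dict updates into one
        have hcomm : ∀ (x : Int),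
            ((d.insert key (v - req)).insert fkey (max 0 (c - fcnt))).insert key x =
            (d.insert key x).insert fkey (max 0 (c - fcnt)) := by
          intro x
          rw [pv_insert_comm _ fkey key (max 0 (c - fcnt)) x
                (by rw [PySem.Dict.contains_insert]; simp [hcf])
                (PySem.Dict.contains_insert_self _ _ _) hne,
              PySem.Dict.insert_insert_self]
        rw [hcomm, PySem.Dict.insert_insert_self]
        have hx : v - req - (k - 1) * req = v - k * req := by ring
        have hprod : 0 ≤ fcnt * (k - 1) := mul_nonneg hf (by omega)
        have hsum : fcnt + fcnt * (k - 1) = fcnt * k := by ring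
        have hmax : max 0 (max 0 (c - fcnt) - fcnt * (k - 1)) = max 0 (c - fcnt * k) := by
          omega
        have htot : total + pvSkuLookup.getD key 0 * req +
            pvSkuLookup.getD key 0 * req * (k - 1) =
            total + pvSkuLookup.getD key 0 * req * k := by ring
        rw [hx, hmax, htot]
      · -- last round
        rw [pvLoopA, dif_neg (by
          simp only [not_and]
          intro _ _
          rw [PySem.Dict.getD_insert_of_ne _ _ _ hkf, PySem.Dict.getD_insert_self]
          omega)]
        have hkeq : k = 1 := by
          rw [hk, PySem.Int.floordiv_eq_iff_of_pos hpos]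
          constructor <;> nlinarith [hbr.1, hbr.2]
        rw [hkeq]
        have hx : v - 1 * req = v - req := by ring
        have hm : fcnt * (1:Int) = fcnt := by ring
        have htot : total + pvSkuLookup.getD key 0 * req * 1 =
            total + pvSkuLookup.getD key 0 * req := by ring
        rw [hx, hm, htot]
    · rw [if_neg hcf, if_neg hcf]
      by_cases h2 : req ≤ v - req
      · have hgk : (d.insert key (v - req)).getD key 0 = v - req :=
          PySem.Dict.getD_insert_self _ _ _ _
        rw [ih (d.insert key (v - req)) _ (by rw [hgk]; omega)
              (PySem.Dict.contains_insert_self _ _ _) (by rw [hgk]; omega)]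
        have hcf2 : (d.insert key (v - req)).contains fkey = false := by
          rw [PySem.Dict.contains_insert]
          simp [hne, hcf]
        have hk2 : PySem.Int.floordiv (v - req) req = k - 1 := by
          rw [PySem.Int.floordiv_eq_iff_of_pos hpos]
          constructor <;> nlinarith [hbr.1, hbr.2]
        rw [hgk, hcf2, if_neg (by simp), hk2, PySem.Dict.insert_insert_self]
        have hx : v - req - (k - 1) * req = v - k * req := by ring
        have htot : total + pvSkuLookup.getD key 0 * req +
            pvSkuLookup.getD key 0 * req * (k - 1) =
            total + pvSkuLookup.getD key 0 * req * k := by ring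
        rw [hx, htot]
      · rw [pvLoopA, dif_neg (by
          simp only [not_and]
          intro _ _
          rw [PySem.Dict.getD_insert_self]
          omega)]
        have hkeq : k = 1 := by
          rw [hk, PySem.Int.floordiv_eq_iff_of_pos hpos]
          constructor <;> nlinarith [hbr.1, hbr.2]
        rw [hkeq]
        have hx : v - 1 * req = v - req := by ring
        have htot : total + pvSkuLookup.getD key 0 * req * 1 =
            total + pvSkuLookup.getD key 0 * req := by ring
        rw [hx, htot]

-- closed form of A's while-loop when the offer key is its own free item (F and U)
lemma pvLoopA_self (key : String) (req fcnt : Int)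
    (hreq : 1 ≤ req) (hf : 0 ≤ fcnt) :
    ∀ (N : Nat) (d : PySem.Dict String Int) (total : Int),
      (d.getD key 0).toNat ≤ N →
      req ≤ d.getD key 0 →
      pvLoopA key req key fcnt d total =
        (d.insert key
           (max 0 (d.getD key 0 -
             PySem.Int.floordiv (d.getD key 0 + fcnt) (req + fcnt) * (req + fcnt))),
         total + pvSkuLookup.getD key 0 * req *
           PySem.Int.floordiv (d.getD key 0 + fcnt) (req + fcnt)) := by
  intro N
  induction N with
  | zero =>
    intro d total hN hv
    exact absurd hN (by omega)
  | succ N ih =>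
    intro d total hN hv
    have hpos : (0:Int) < req + fcnt := by omega
    rw [pvLoopA, dif_pos ⟨hreq, hf, hv⟩]
    simp only [PySem.Dict.contains_insert_self, if_true, PySem.Dict.getD_insert_self,
      PySem.Dict.insert_insert_self]
    set v := d.getD key 0 with hv0
    set k := PySem.Int.floordiv (v + fcnt) (req + fcnt) with hk
    have hbr : k * (req + fcnt) ≤ v + fcnt ∧ v + fcnt < (k + 1) * (req + fcnt) :=
      (PySem.Int.floordiv_eq_iff_of_pos hpos).mp hk.symm
    by_cases h2 : req ≤ max 0 (v - req - fcnt)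
    · -- the loop runs again
      have hmax : max 0 (v - req - fcnt) = v - (req + fcnt) := by omega
      rw [hmax,
        ih (d.insert key (v - (req + fcnt))) _
          (by rw [PySem.Dict.getD_insert_self]; omega)
          (by rw [PySem.Dict.getD_insert_self]; omega)]
      rw [PySem.Dict.getD_insert_self, PySem.Dict.insert_insert_self]
      have hk2 : PySem.Int.floordiv (v - (req + fcnt) + fcnt) (req + fcnt) = k - 1 := by
        rw [PySem.Int.floordiv_eq_iff_of_pos hpos]
        constructor <;> nlinarith [hbr.1, hbr.2]
      rw [hk2]
      have h3 : v - (req + fcnt) - (k - 1) * (req + fcnt) = v - k * (req + fcnt) := by ring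
      have h4 : total + pvSkuLookup.getD key 0 * req +
          pvSkuLookup.getD key 0 * req * (k - 1) =
          total + pvSkuLookup.getD key 0 * req * k := by ring
      rw [h3, h4]
    · -- last round
      rw [pvLoopA, dif_neg (by
        simp only [PySem.Dict.getD_insert_self, not_and]
        exact fun _ _ => by omega)]
      have hk1 : k = 1 := by
        have h5 : req ≤ v := hv
        rw [hk, PySem.Int.floordiv_eq_iff_of_pos hpos]
        constructor <;> omega
      rw [hk1]
      have h3 : max 0 (v - 1 * (req + fcnt)) = max 0 (v - req - fcnt) := by
        have : v - 1 * (req + fcnt) = v - req - fcnt := by ring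
        rw [this]
      have h4 : total + pvSkuLookup.getD key 0 * req * 1 =
          total + pvSkuLookup.getD key 0 * req := by ring
      rw [h3, h4]

lemma pvStep_eq_nonself (key fkey : String) (req fcnt : Int)
    (hne : fkey ≠ key) (hreq : 1 ≤ req) (hf : 0 ≤ fcnt)
    (hprice : pvPricesB.getD key 0 = pvSkuLookup.getD key 0) :
    ∀ st, pvStepA st (key, req, fkey, fcnt) = pvStepB st (key, req, fkey, fcnt) := by
  rintro ⟨d, t⟩
  show (if d.contains key then pvLoopA key req fkey fcnt d t else (d, t)) = _
  rcases hg : d.get? key with _ | n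
  · have hc : d.contains key = false := by
      rw [PySem.Dict.contains_eq_isSome_get?, hg]; rfl
    simp [pvStepB, hc, hg]
  · have hc : d.contains key = true := by
      rw [PySem.Dict.contains_eq_isSome_get?, hg]; rfl
    have hgD : d.getD key 0 = n := PySem.Dict.getD_of_get?_eq_some d 0 hg
    rw [if_pos hc]
    show _ = pvStepB (d, t) (key, req, fkey, fcnt)
    unfold pvStepB
    simp only [hg]
    by_cases hlt : n < req
    · rw [pvLoopA]
      rw [dif_neg (by rw [hgD]; omega), if_pos hlt]
    · rw [if_neg hlt, if_neg (by simp [hne]),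
        pvLoopA_nonself key fkey req fcnt hne hreq hf (d.getD key 0).toNat d t le_rfl hc
          (by omega)]
      simp only [hgD, hprice]
      simp [PySem.Dict.contains_insert, PySem.Dict.getD_insert, hne]

lemma pvStep_eq_self (key : String) (req fcnt : Int)
    (hreq : 1 ≤ req) (hf : 0 ≤ fcnt)
    (hprice : pvPricesB.getD key 0 = pvSkuLookup.getD key 0) :
    ∀ st, pvStepA st (key, req, key, fcnt) = pvStepB st (key, req, key, fcnt) := by
  rintro ⟨d, t⟩
  show (if d.contains key then pvLoopA key req key fcnt d t else (d, t)) = _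
  rcases hg : d.get? key with _ | n
  · have hc : d.contains key = false := by
      rw [PySem.Dict.contains_eq_isSome_get?, hg]; rfl
    simp [pvStepB, hc, hg]
  · have hc : d.contains key = true := by
      rw [PySem.Dict.contains_eq_isSome_get?, hg]; rfl
    have hgD : d.getD key 0 = n := PySem.Dict.getD_of_get?_eq_some d 0 hg
    rw [if_pos hc]
    show _ = pvStepB (d, t) (key, req, key, fcnt)
    unfold pvStepB
    simp only [hg]
    by_cases hlt : n < req
    · rw [pvLoopA]
      rw [dif_neg (by rw [hgD]; omega), if_pos hlt]
    · rw [if_neg hlt, if_pos (by simp),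
        pvLoopA_self key req fcnt hreq hf (d.getD key 0).toNat d t le_rfl (by omega)]
      simp only [hgD, hprice]

-- ===== VERDICT (by name: the statement is the Claim_ definition above) =====
theorem buy_x_get_x_free_spec : Claim_equal_buy_x_get_x_free := by
  intro basket _
  unfold Spec_buy_x_get_x_free
  have hE := pvStep_eq_nonself "E" "B" 2 1 (by decide) (by decide) (by decide) (by decide)
  have hF := pvStep_eq_self "F" 2 1 (by decide) (by decide) (by decide)
  have hN := pvStep_eq_nonself "N" "M" 3 1 (by decide) (by decide) (by decide) (by decide)
  have hR := pvStep_eq_nonself "R" "Q" 3 1 (by decide) (by decide) (by decide) (by decide)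
  have hU := pvStep_eq_self "U" 3 1 (by decide) (by decide) (by decide)
  simp only [buy_x_get_x_free, buy_x_get_x_free_alt, pvSpecialOffersA, pvOffersB,
    List.foldl_cons, List.foldl_nil, hE, hF, hN, hR, hU]
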